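-- pv_equiv track=rewrite | github.com/aio-libs/aiozipkin | aiozipkin/helpers.py | filter_none
-- ===== SOURCE A (Python) =====
-- from typing import NamedTuple, Optional, Dict, List, Any
--
-- OptKeys = Optional[List[str]]
--
-- def filter_none(data: Dict[str, Any],
--                 keys: OptKeys=None) -> Dict[str, Any]:
--     """Filter keys from dict with None values.
--
--     Check occurs only on root level. If list of keys specified, filter
--     works only for selected keys
--     """
--
--     def limited_filter(k: str, v: Any) -> bool:
--         return k not in keys or v is not None  # type: ignore
--
--     def full_filter(k: str, v: Any) -> bool:
--         return v is not None
--
--     f = limited_filter if keys is not None else full_filter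
--     return {k: v for k, v in data.items() if f(k, v)}
-- ===== SOURCE B (Python) =====
-- from typing import Optional, Dict, List, Any
--
-- OptKeys = Optional[List[str]]
--
-- def filter_none(data: Dict[str, Any],
--                 keys: OptKeys=None) -> Dict[str, Any]:
--     """Copy the dict, then delete None-valued entries (all of them, or
--     only those whose key is listed in ``keys``)."""
--     result = dict(data)
--     if keys is None:
--         for k, v in data.items():
--             if v is None:
--                 del result[k]
--     else:
--         for k in keys:
--             if k in result and result[k] is None:
--                 del result[k]
--     return result
-- ===== Notes on version B (the rewrite author's own statement) =====
-- stated objective: faster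
-- what changed: B copies the dict and deletes offending keys instead of filtering while rebuilding; with a key list it iterates over the candidate keys rather than over all of data.
import Mathlib
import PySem

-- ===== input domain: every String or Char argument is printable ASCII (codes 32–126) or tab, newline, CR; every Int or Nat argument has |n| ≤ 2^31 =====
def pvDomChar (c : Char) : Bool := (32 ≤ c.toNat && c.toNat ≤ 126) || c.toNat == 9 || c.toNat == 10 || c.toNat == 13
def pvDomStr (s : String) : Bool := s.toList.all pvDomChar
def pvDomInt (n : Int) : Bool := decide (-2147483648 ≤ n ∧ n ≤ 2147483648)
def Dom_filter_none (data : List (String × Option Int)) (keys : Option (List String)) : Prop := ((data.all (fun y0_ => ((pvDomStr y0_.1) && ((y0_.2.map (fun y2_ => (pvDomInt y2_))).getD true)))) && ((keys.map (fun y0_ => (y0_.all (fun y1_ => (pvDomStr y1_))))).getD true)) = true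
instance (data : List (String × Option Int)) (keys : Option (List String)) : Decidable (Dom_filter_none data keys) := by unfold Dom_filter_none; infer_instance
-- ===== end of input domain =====

-- B re-derives filter_none by copying the dict and deleting None-valued keys (all, or only the listed candidates) instead of filtering while rebuilding; equivalence proved for duplicate-free key lists (the dict domain).
-- ===== PORT A =====
-- A: dict comprehension keeping entries that pass f (limited_filter when keys given, else full_filter)
def filter_none (data : List (String × Option Int)) (keys : Option (List String)) : List (String × Option Int) :=
  match keys with
  | some ks => data.filter (fun kv => !ks.contains kv.1 || kv.2.isSome)   -- limited_filter
  | none    => data.filter (fun kv => kv.2.isSome)                        -- full_filter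

-- ===== PORT B =====
-- del result[k] : remove the (unique) entry with key k
def pyDelKey (result : List (String × Option Int)) (k : String) : List (String × Option Int) :=
  result.eraseP (fun kv => kv.1 == k)

def filter_none_alt (data : List (String × Option Int)) (keys : Option (List String)) : List (String × Option Int) :=
  match keys with
  | none =>
    -- for k, v in data.items(): if v is None: del result[k]
    data.foldl (fun result kv => if kv.2 = none then pyDelKey result kv.1 else result) data
  | some ks =>
    -- for k in keys: if k in result and result[k] is None: del result[k]
    ks.foldl (fun result k =>
      if (result.find? (fun kv => kv.1 == k)).map Prod.snd = some none then pyDelKey result k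
      else result) data

-- ===== PRECONDITION & SPEC =====
-- Pre_: the assoc list represents a Python dict, so its keys are distinct (a duplicate-key
-- list corresponds to no dict input of A; there A's filter and B's copy-and-delete differ).
def Pre_filter_none (data : List (String × Option Int)) (keys : Option (List String)) : Prop :=
  (data.map Prod.fst).Nodup
instance (data : List (String × Option Int)) (keys : Option (List String)) : Decidable (Pre_filter_none data keys) := by unfold Pre_filter_none; infer_instance
def pvWitness_filter_none : (List (String × Option Int)) × Option (List String) :=
  ([("a", some 1), ("b", none), ("c", none)], some ["b", "x"])

def Spec_filter_none (data : List (String × Option Int)) (keys : Option (List String)) (out : List (String × Option Int)) : Prop := out = filter_none_alt data keys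
instance (data : List (String × Option Int)) (keys : Option (List String)) (out : List (String × Option Int)) : Decidable (Spec_filter_none data keys out) := by unfold Spec_filter_none; infer_instance

-- ===== CLAIM (what is proved, stated in full; the proofs are below) =====
def Claim_equal_filter_none : Prop := ∀ (data : List (String × Option Int)) (keys : Option (List String)), Dom_filter_none data keys → Pre_filter_none data keys → Spec_filter_none data keys (filter_none data keys)

-- ===== LEMMAS AND PROOFS =====

-- Under distinct keys, deleting the (first) entry with key k is filtering key k out.
theorem pyDelKey_eq_filter (acc : List (String × Option Int)) (k : String)
    (h : (acc.map Prod.fst).Nodup) :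
    pyDelKey acc k = acc.filter (fun kv => kv.1 != k) := by
  induction acc with
  | nil => rfl
  | cons p t ih =>
    simp only [List.map_cons, List.nodup_cons] at h
    by_cases hk : p.1 = k
    · simp only [pyDelKey, List.eraseP_cons, hk, beq_self_eq_true, List.filter_cons, bne_self_eq_false]
      symm
      refine List.filter_eq_self.2 ?_
      intro x hx
      have : x.1 ∈ t.map Prod.fst := List.mem_map_of_mem hx
      simp only [bne_iff_ne, ne_eq]
      intro hxk
      exact h.1 (hk ▸ hxk ▸ this)
    · have hb : (p.1 == k) = false := by simp [hk]
      simp only [pyDelKey, List.eraseP_cons, List.filter_cons, hb, bne,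
        Bool.not_false]
      exact congrArg (p :: ·) (ih h.2)

theorem nodup_keys_filter (acc : List (String × Option Int)) (p : String × Option Int → Bool)
    (h : (acc.map Prod.fst).Nodup) : ((acc.filter p).map Prod.fst).Nodup :=
  (((List.filter_sublist (l := acc) (p := p)).map Prod.fst)).nodup h

-- The unique-key lookup: find? at the key of a member returns that member.
theorem find?_self (acc : List (String × Option Int)) (kv : String × Option Int)
    (h : (acc.map Prod.fst).Nodup) (hm : kv ∈ acc) :
    acc.find? (fun p => p.1 == kv.1) = some kv := by
  induction acc with
  | nil => cases hm
  | cons q t ih =>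
    simp only [List.map_cons, List.nodup_cons] at h
    rcases List.mem_cons.1 hm with rfl | hm'
    · simp
    · have hq : (q.1 == kv.1) = false := by
        simp only [beq_eq_false_iff_ne, ne_eq]
        intro he
        exact h.1 (he ▸ List.mem_map_of_mem hm')
      simp only [List.find?_cons, hq, cond_false]
      exact ih h.2 hm'

-- Loop invariant for B's keys-is-None branch.
theorem foldA_eq_filter (l acc : List (String × Option Int))
    (h : (acc.map Prod.fst).Nodup) :
    l.foldl (fun result kv => if kv.2 = none then pyDelKey result kv.1 else result) acc
      = acc.filter (fun kv => decide (∀ p ∈ l, p.2 = none → p.1 ≠ kv.1)) := by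
  induction l generalizing acc with
  | nil => simp
  | cons q t ih =>
    simp only [List.foldl_cons]
    by_cases hq : q.2 = none
    · rw [if_pos hq, pyDelKey_eq_filter acc q.1 h,
        ih _ (nodup_keys_filter _ _ h), List.filter_filter]
      refine List.filter_congr ?_
      intro kv _
      rw [Bool.eq_iff_iff]
      simp only [decide_eq_true_eq, Bool.and_eq_true, bne_iff_ne, ne_eq,
        List.forall_mem_cons, hq, forall_const]
      aesop

    · rw [if_neg hq, ih _ h]
      refine List.filter_congr ?_
      intro kv _
      rw [Bool.eq_iff_iff]
      simp only [decide_eq_true_eq, List.forall_mem_cons]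
      constructor
      · intro hall
        exact ⟨fun hpn => absurd hpn hq, hall⟩
      · intro hall
        exact hall.2

-- Loop invariant for B's explicit-keys branch.
theorem foldB_eq_filter (ks : List String) (acc : List (String × Option Int))
    (h : (acc.map Prod.fst).Nodup) :
    ks.foldl (fun result k =>
        if (result.find? (fun kv => kv.1 == k)).map Prod.snd = some none then pyDelKey result k
        else result) acc
      = acc.filter (fun kv => kv.2.isSome || decide (kv.1 ∉ ks)) := by
  induction ks generalizing acc with
  | nil => simp
  | cons k t ih =>
    simp only [List.foldl_cons]
    by_cases hf : (acc.find? (fun kv => kv.1 == k)).map Prod.snd = some none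
    · rw [if_pos hf, pyDelKey_eq_filter acc k h, ih _ (nodup_keys_filter _ _ h),
        List.filter_filter]
      obtain ⟨kv0, hfind, hv0⟩ : ∃ kv0, acc.find? (fun kv => kv.1 == k) = some kv0 ∧ kv0.2 = none := by
        cases he : acc.find? (fun kv => kv.1 == k) with
        | none => rw [he] at hf; simp at hf
        | some kv0 => rw [he] at hf; simp at hf; exact ⟨kv0, rfl, hf⟩
      have hkv0mem : kv0 ∈ acc := List.mem_of_find?_eq_some hfind
      have hkv0key : kv0.1 = k := by
        have := List.find?_some hfind
        simpa using this
      refine List.filter_congr ?_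
      intro kv hkv
      by_cases hk : kv.1 = k
      · have : kv = kv0 := by
          have h1 : acc.find? (fun p => p.1 == kv.1) = some kv := find?_self acc kv h hkv
          rw [hk, ← hkv0key] at h1
          have h2 : acc.find? (fun p => p.1 == kv0.1) = some kv0 := find?_self acc kv0 h hkv0mem
          rw [h1] at h2; exact Option.some_inj.1 h2
        subst this
        simp [hv0, hkv0key]
      · rw [Bool.eq_iff_iff]
        simp only [Bool.and_eq_true, Bool.or_eq_true, bne_iff_ne, ne_eq, decide_eq_true_eq,
          List.mem_cons, not_or]
        tauto
    · rw [if_neg hf, ih _ h]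
      refine List.filter_congr ?_
      intro kv hkv
      by_cases hs : kv.2.isSome
      · simp [hs]
      · have hvn : kv.2 = none := Option.not_isSome_iff_eq_none.1 (by simpa using hs)
        have hk : kv.1 ≠ k := by
          intro he
          apply hf
          rw [← he, find?_self acc kv h hkv]
          simp [hvn]
        rw [Bool.eq_iff_iff]
        simp only [Bool.or_eq_true, decide_eq_true_eq, List.mem_cons, not_or]
        tauto


-- ===== VERDICT (by name: the statement is the Claim_ definition above) =====
theorem filter_none_spec : Claim_equal_filter_none := by
  intro data keys _ hpre
  have hnd : (data.map Prod.fst).Nodup := hpre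
  unfold Spec_filter_none
  cases keys with
  | none =>
    show List.filter _ data = List.foldl _ data data
    rw [foldA_eq_filter data data hnd]
    refine (List.filter_congr ?_).symm
    intro kv hkv
    by_cases hs : kv.2 = none
    · rw [Bool.eq_iff_iff]
      simp only [hs, Option.isSome_none, Bool.false_eq_true, decide_eq_true_eq]
      exact iff_false_intro (fun hall => hall kv hkv hs rfl)
    · obtain ⟨v, hv⟩ := Option.ne_none_iff_exists'.1 hs
      rw [Bool.eq_iff_iff]
      simp only [hv, Option.isSome_some, decide_eq_true_eq]
      refine iff_true_intro (fun p hp hpn hpe => ?_)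
      have hpkv : p = kv := List.inj_on_of_nodup_map hnd hp hkv hpe
      rw [hpkv, hv] at hpn
      cases hpn
  | some ks =>
    show List.filter _ data = List.foldl _ data ks
    rw [foldB_eq_filter ks data hnd]
    refine (List.filter_congr ?_).symm
    intro kv _
    rw [Bool.eq_iff_iff]
    simp only [Bool.or_eq_true, Bool.not_eq_eq_eq_not, Bool.not_true, decide_eq_true_eq,
      List.contains_eq_mem, decide_eq_false_iff_not]
    tauto
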